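-- pv_equiv track=rewrite | github.com/JasonLC506/DeepPSEM | experiment/data_generator.py | context_generate
-- ===== SOURCE A (Python) =====
-- def context_generate(
--         texts,
--         size_context,
--         paddle_index
-- ):
--     assert size_context % 2 == 0
--     size = size_context // 2
--     pads = [paddle_index for _ in range(size)]
--     contexts = []
--     for text in texts:
--         text_pad = pads + text + pads
--         context = [
--             (
--                 text_pad[i - size: i] + text_pad[i + 1: i + size + 1]
--             ) for i in range(size, len(text_pad) - size)
--         ]
--         contexts.append(context)
--     return contexts
-- ===== SOURCE B (Python) =====
-- def _at(text, n, k, paddle_index):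
--     return text[k] if 0 <= k < n else paddle_index
--
--
-- def context_generate(
--         texts,
--         size_context,
--         paddle_index
-- ):
--     assert size_context % 2 == 0
--     size = size_context // 2
--     contexts = []
--     for text in texts:
--         n = len(text)
--         context = []
--         for j in range(n):
--             window = []
--             for off in range(-size, 0):
--                 window.append(_at(text, n, j + off, paddle_index))
--             for off in range(1, size + 1):
--                 window.append(_at(text, n, j + off, paddle_index))
--             context.append(window)
--         contexts.append(context)
--     return contexts
-- ===== Notes on version B (the rewrite author's own statement) =====
-- stated objective: simpler
-- what changed: B builds each context window by direct bounds-checked indexing into the original text (offset loops with a padding fallback), instead of materialising a padded copy pads+text+pads of every text and slicing it twice per token.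
-- outside the precondition, e.g. on context_generate([[1]], -2, 0): A returns [[[], [], []]], B returns [[[]]]; on context_generate([[1]], 3, 0): A raises AssertionError, B raises AssertionError
import Mathlib
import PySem

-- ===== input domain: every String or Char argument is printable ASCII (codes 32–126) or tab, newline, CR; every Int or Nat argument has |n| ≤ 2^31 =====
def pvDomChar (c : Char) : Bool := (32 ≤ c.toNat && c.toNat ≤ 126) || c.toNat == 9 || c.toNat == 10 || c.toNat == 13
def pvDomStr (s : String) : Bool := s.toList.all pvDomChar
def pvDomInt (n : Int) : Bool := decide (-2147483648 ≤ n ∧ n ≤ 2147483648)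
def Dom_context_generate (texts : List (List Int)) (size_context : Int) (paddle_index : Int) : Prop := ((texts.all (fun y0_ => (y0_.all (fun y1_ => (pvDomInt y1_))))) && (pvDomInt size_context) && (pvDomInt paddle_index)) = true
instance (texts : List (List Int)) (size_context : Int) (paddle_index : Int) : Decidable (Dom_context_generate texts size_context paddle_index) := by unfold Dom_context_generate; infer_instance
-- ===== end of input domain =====

-- B builds each context window by bounds-checked indexing into the original text instead of
-- slicing a materialised padded copy pads + text + pads; objective: simpler (same asymptotic cost).


-- ===== PORT A =====
def context_generate (texts : List (List Int)) (size_context : Int) (paddle_index : Int) : List (List (List Int)) :=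
  -- assert size_context % 2 == 0  → Pre_context_generate
  let size := PySem.Int.floordiv size_context 2
  let pads := (PySem.List.pyRange 0 size 1).map (fun _ => paddle_index)
  texts.foldl (fun contexts text =>
    let text_pad := pads ++ (text ++ pads)
    contexts ++ [(PySem.List.pyRange size ((text_pad.length : Int) - size) 1).map (fun i =>
      PySem.List.slice text_pad (some (i - size)) (some i) ++
      PySem.List.slice text_pad (some (i + 1)) (some (i + size + 1)))]) []

-- ===== PORT B =====
-- helper _at(text, n, k, paddle_index) of Source B
def pvAt (text : List Int) (n : Int) (k : Int) (paddle_index : Int) : Int :=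
  if 0 ≤ k ∧ k < n then (PySem.List.pyGet? text k).getD paddle_index else paddle_index

def context_generate_alt (texts : List (List Int)) (size_context : Int) (paddle_index : Int) : List (List (List Int)) :=
  let size := PySem.Int.floordiv size_context 2
  texts.map (fun text =>
    let n : Int := (text.length : Int)
    (PySem.List.pyRange 0 n 1).map (fun j =>
      (PySem.List.pyRange (-size) 0 1).map (fun off => pvAt text n (j + off) paddle_index) ++
      (PySem.List.pyRange 1 (size + 1) 1).map (fun off => pvAt text n (j + off) paddle_index)))

-- ===== PRECONDITION & SPEC =====
-- A's assert raises on odd size_context. Pre_ additionally excludes negative (even) size_context,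
-- outside the function's natural domain of window sizes: there A's value is an artefact of
-- negative-index slice wraparound (empty windows, one per position of range(size, len-size)).
def Pre_context_generate (texts : List (List Int)) (size_context : Int) (paddle_index : Int) : Prop :=
  size_context % 2 = 0 ∧ 0 ≤ size_context
instance (texts : List (List Int)) (size_context : Int) (paddle_index : Int) : Decidable (Pre_context_generate texts size_context paddle_index) := by unfold Pre_context_generate; infer_instance
def pvWitness_context_generate : List (List Int) × Int × Int := ([[1, 2, 3], []], 2, 9)

def Spec_context_generate (texts : List (List Int)) (size_context : Int) (paddle_index : Int) (out : List (List (List Int))) : Prop := out = context_generate_alt texts size_context paddle_index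
instance (texts : List (List Int)) (size_context : Int) (paddle_index : Int) (out : List (List (List Int))) : Decidable (Spec_context_generate texts size_context paddle_index out) := by unfold Spec_context_generate; infer_instance

-- ===== CLAIM (what is proved, stated in full; the proofs are below) =====
def Claim_equal_context_generate : Prop := ∀ (texts : List (List Int)) (size_context : Int) (paddle_index : Int), Dom_context_generate texts size_context paddle_index → Pre_context_generate texts size_context paddle_index → Spec_context_generate texts size_context paddle_index (context_generate texts size_context paddle_index)

-- ===== LEMMAS AND PROOFS =====

-- pyGet? of a nonnegative index is plain optional indexing
theorem pvAt_pyGet (text : List Int) (t : Int) (h : 0 ≤ t) :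
    PySem.List.pyGet? text t = text[t.toNat]? := by
  simp only [PySem.List.pyGet?, PySem.List.pyIdx?, if_pos h]
  split_ifs with hlt
  · simp
  · rw [show ((none : Option Nat).bind fun a => text[a]?) = (none : Option Int) from rfl]
    symm
    rw [List.getElem?_eq_none_iff]
    omega

-- the padded text indexed at idx is B's bounds-checked access at idx - s
theorem pv_tpGet (text : List Int) (p : Int) (s idx : Nat) (h : idx < text.length + 2 * s) :
    (List.replicate s p ++ (text ++ List.replicate s p))[idx]? =
      some (pvAt text (text.length : Int) ((idx : Int) - (s : Int)) p) := by
  by_cases h1 : idx < s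
  · rw [List.getElem?_append_left (by simpa using h1), List.getElem?_replicate, if_pos h1]
    simp only [pvAt]
    rw [if_neg (by omega)]
  · rw [List.getElem?_append_right (by simpa using h1)]
    simp only [List.length_replicate]
    by_cases h2 : idx - s < text.length
    · rw [List.getElem?_append_left h2]
      simp only [pvAt]
      rw [if_pos (by constructor <;> omega), pvAt_pyGet text _ (by omega)]
      have ht : ((idx : Int) - (s : Int)).toNat = idx - s := by omega
      rw [ht, List.getElem?_eq_getElem h2]
      simp
    · rw [List.getElem?_append_right (by omega), List.getElem?_replicate, if_pos (by omega)]
      simp only [pvAt]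
      rw [if_neg (by omega)]

-- a take-of-drop of the padded text is a range-map of B's bounds-checked accesses
theorem pv_window (text : List Int) (p : Int) (s a : Nat) (ha : a + s ≤ text.length + 2 * s)
    (f : Nat → Int) (hf : ∀ i : Nat, i < s → f i = (a : Int) + (i : Int) - (s : Int)) :
    ((List.replicate s p ++ (text ++ List.replicate s p)).drop a).take s =
      (List.range s).map (fun i => pvAt text (text.length : Int) (f i) p) := by
  apply List.ext_getElem?
  intro n
  by_cases hn : n < s
  · rw [List.getElem?_take_of_lt hn, List.getElem?_drop,
      pv_tpGet text p s (a + n) (by omega), List.getElem?_map, List.getElem?_range hn]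
    simp only [Option.map_some]
    congr 1
    rw [hf n hn, show ((a + n : Nat) : Int) - (s : Int) = (a : Int) + (n : Int) - (s : Int) from by push_cast; ring]
  · have l1 : (((List.replicate s p ++ (text ++ List.replicate s p)).drop a).take s)[n]? = none := by
      rw [List.getElem?_eq_none_iff]
      simp
      omega
    have l2 : ((List.range s).map (fun i => pvAt text (text.length : Int) (f i) p))[n]? = none := by
      rw [List.getElem?_eq_none_iff]
      simp
      omega
    rw [l1, l2]

-- per-text equality of the two window lists, with size already a natural number s
theorem pv_perText (text : List Int) (p : Int) (s : Nat) :
    (PySem.List.pyRange (s : Int)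
        (((List.replicate s p ++ (text ++ List.replicate s p)).length : Int) - (s : Int)) 1).map
      (fun i =>
        PySem.List.slice (List.replicate s p ++ (text ++ List.replicate s p)) (some (i - (s : Int))) (some i) ++
        PySem.List.slice (List.replicate s p ++ (text ++ List.replicate s p)) (some (i + 1)) (some (i + (s : Int) + 1))) =
    (PySem.List.pyRange 0 (text.length : Int) 1).map (fun j =>
      (PySem.List.pyRange (-(s : Int)) 0 1).map (fun off => pvAt text (text.length : Int) (j + off) p) ++
      (PySem.List.pyRange 1 ((s : Int) + 1) 1).map (fun off => pvAt text (text.length : Int) (j + off) p)) := by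
  have hlen : (((List.replicate s p ++ (text ++ List.replicate s p)).length : Int) - (s : Int))
      = ((s + text.length : Nat) : Int) := by
    simp only [List.length_append, List.length_replicate]
    omega
  rw [hlen, PySem.List.pyRange_one, PySem.List.pyRange_one 0 (text.length : Int)]
  have c1 : (((s + text.length : Nat) : Int) - (s : Int)).toNat = text.length := by omega
  have c2 : ((text.length : Int) - 0).toNat = text.length := by omega
  rw [c1, c2, List.map_map, List.map_map]
  apply List.map_congr_left
  intro j hj
  rw [List.mem_range] at hj
  simp only [Function.comp_def, zero_add]
  have e2 : ((s : Int) + (j : Int)) = ((j + s : Nat) : Int) := by omega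
  rw [e2]
  have e1 : (((j + s : Nat) : Int) - (s : Int)) = ((j : Nat) : Int) := by omega
  rw [e1]
  have e4 : (((j + s : Nat) : Int) + (s : Int)) = ((j + s + s : Nat) : Int) := by omega
  rw [e4]
  have e3 : (((j + s : Nat) : Int) + 1) = ((j + s + 1 : Nat) : Int) := by omega
  rw [e3]
  have e5 : (((j + s + s : Nat) : Int) + 1) = ((j + s + s + 1 : Nat) : Int) := by omega
  rw [e5]
  rw [PySem.List.slice_natCast, PySem.List.slice_natCast]
  have t1 : j + s - j = s := by omega
  have t2 : j + s + s + 1 - (j + s + 1) = s := by omega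
  rw [t1, t2]
  rw [PySem.List.pyRange_one (-(s : Int)) 0, PySem.List.pyRange_one 1 ((s : Int) + 1)]
  have c3 : ((0 : Int) - -(s : Int)).toNat = s := by omega
  have c4 : (((s : Int) + 1) - 1).toNat = s := by omega
  rw [c3, c4, List.map_map, List.map_map]
  simp only [Function.comp_def]
  congr 1
  · exact pv_window text p s j (by omega) _ (fun i hi => by ring)
  · exact pv_window text p s (j + s + 1) (by omega) _ (fun i hi => by push_cast; ring)

-- ===== VERDICT (by name: the statement is the Claim_ definition above) =====
theorem context_generate_spec : Claim_equal_context_generate := by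
  intro texts size_context paddle_index _ hpre
  obtain ⟨heven, hnn⟩ := hpre
  unfold Spec_context_generate
  simp only [context_generate, context_generate_alt]
  have hdivnn : 0 ≤ PySem.Int.floordiv size_context 2 := by
    rw [PySem.Int.floordiv_eq_ediv_of_pos (by omega)]
    exact Int.ediv_nonneg hnn (by omega)
  set s := (PySem.Int.floordiv size_context 2).toNat with hs
  have hsize : PySem.Int.floordiv size_context 2 = (s : Int) := by omega
  rw [hsize]
  have hpads : (PySem.List.pyRange 0 (s : Int) 1).map (fun _ => paddle_index)
      = List.replicate s paddle_index := by
    rw [PySem.List.pyRange_one]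
    have : ((s : Int) - 0).toNat = s := by omega
    rw [this, List.map_map]
    show (List.range s).map (fun _ => paddle_index) = _
    simp [List.map_const']
  rw [hpads, PySem.List.foldl_append_singleton_eq_map]
  apply List.map_congr_left
  intro text _
  exact pv_perText text paddle_index s
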